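-- pv_equiv track=rewrite | github.com/yoobyoungcheol/pythonstudy24 | pos자판기/lotto.py | check
-- ===== SOURCE A (Python) =====
-- def check(lotto_num):
--     i=0; dupli = True
--
--     while i<45:
--         if lotto_num.count(i) < 2:
--             i+=1
--             continue
--         else:
--             dupli = False
--             break
--
--     return dupli
-- ===== SOURCE B (Python) =====
-- def check(lotto_num):
--     seen = set()
--     for x in lotto_num:
--         if 0 <= x <= 44:
--             if x in seen:
--                 return False
--             seen.add(x)
--     return True
-- ===== Notes on version B (the rewrite author's own statement) =====
-- stated objective: faster
-- what changed: Replaces the 0..44 scan with a repeated .count() over the whole list by a single pass over the list maintaining a set of in-range values already seen.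
import Mathlib
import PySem

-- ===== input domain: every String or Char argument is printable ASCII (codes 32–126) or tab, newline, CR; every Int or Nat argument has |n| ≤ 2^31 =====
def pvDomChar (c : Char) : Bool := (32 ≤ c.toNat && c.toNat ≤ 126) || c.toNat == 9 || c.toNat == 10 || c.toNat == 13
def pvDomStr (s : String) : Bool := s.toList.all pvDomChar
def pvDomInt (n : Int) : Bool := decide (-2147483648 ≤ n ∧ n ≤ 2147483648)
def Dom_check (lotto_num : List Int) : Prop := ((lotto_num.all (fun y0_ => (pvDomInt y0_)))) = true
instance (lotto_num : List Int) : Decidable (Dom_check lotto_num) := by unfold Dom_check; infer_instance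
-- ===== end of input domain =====

-- B replaces A's 0..44 outer scan with repeated .count() by one pass over the list with a seen-set (constant-factor faster).

-- ===== PORT A =====
-- while i < 45: if lotto_num.count(i) < 2: i += 1 else: dupli = False; break
def checkLoop (xs : List Int) (i : Nat) : Bool :=
  if i < 45 then
    if PySem.List.count xs (i : Int) < 2 then checkLoop xs (i + 1) else false
  else true
termination_by 45 - i

def check (lotto_num : List Int) : Bool := checkLoop lotto_num 0

-- ===== PORT B =====
-- for x in lotto_num: if 0 <= x <= 44: if x in seen: return False; seen.add(x); return True
def checkAltLoop (xs : List Int) (seen : PySem.Set Int) : Bool :=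
  match xs with
  | [] => true
  | x :: rest =>
    if 0 ≤ x ∧ x ≤ 44 then
      if PySem.Set.contains seen x then false
      else checkAltLoop rest (PySem.Set.add seen x)
    else checkAltLoop rest seen

def check_alt (lotto_num : List Int) : Bool := checkAltLoop lotto_num PySem.Set.empty

-- ===== PRECONDITION & SPEC =====
def Spec_check (lotto_num : List Int) (out : Bool) : Prop := out = check_alt lotto_num
instance (lotto_num : List Int) (out : Bool) : Decidable (Spec_check lotto_num out) := by unfold Spec_check; infer_instance

-- ===== CLAIM (what is proved, stated in full; the proofs are below) =====
def Claim_equal_check : Prop := ∀ (lotto_num : List Int), Dom_check lotto_num → Spec_check lotto_num (check lotto_num)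

-- ===== LEMMAS AND PROOFS =====

theorem checkLoop_eq_true (xs : List Int) (i : Nat) :
    checkLoop xs i = true ↔ ∀ j : Nat, i ≤ j → j < 45 → xs.count (j : Int) ≤ 1 := by
  induction i using checkLoop.induct xs with
  | case1 i hi hcnt ih =>
    rw [checkLoop, if_pos hi, if_pos hcnt]
    rw [PySem.List.count_eq] at hcnt
    constructor
    · intro h j hij hj45
      rcases Nat.eq_or_lt_of_le hij with rfl | hlt
      · omega
      · exact (ih.mp h) j hlt hj45
    · intro h
      exact ih.mpr (fun j hij hj45 => h j (by omega) hj45)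
  | case2 i hi hcnt =>
    rw [checkLoop, if_pos hi, if_neg hcnt]
    rw [PySem.List.count_eq] at hcnt
    simp only [Bool.false_eq_true, false_iff, not_forall]
    exact ⟨i, le_refl i, hi, by omega⟩
  | case3 i hi =>
    rw [checkLoop, if_neg hi]
    simp only [true_iff]
    intro j hij hj45
    omega

theorem checkAltLoop_eq_true (xs : List Int) (seen : PySem.Set Int) :
    checkAltLoop xs seen = true ↔
      ∀ y : Int, 0 ≤ y → y ≤ 44 → (y ∈ seen → y ∉ xs) ∧ xs.count y ≤ 1 := by
  induction xs generalizing seen with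
  | nil =>
    refine ⟨fun _ y _ _ => ⟨fun _ h => absurd h (List.not_mem_nil), by simp⟩, fun _ => rfl⟩
  | cons x rest ih =>
    by_cases hr : 0 ≤ x ∧ x ≤ 44
    · by_cases hs : x ∈ seen
      · rw [checkAltLoop, if_pos hr, if_pos ((PySem.Set.contains_iff _ _).mpr hs)]
        simp only [Bool.false_eq_true, false_iff, not_forall]
        exact ⟨x, hr.1, hr.2, by simp [hs]⟩
      · rw [checkAltLoop, if_pos hr, if_neg (by rw [PySem.Set.contains_iff]; exact hs)]
        rw [ih]
        constructor
        · intro h y hy0 hy44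
          rcases h y hy0 hy44 with ⟨hmem, hcnt⟩
          by_cases hyx : y = x
          · subst hyx
            have hnr : y ∉ rest := hmem ((PySem.Set.mem_add _ _ _).mpr (Or.inr rfl))
            refine ⟨fun hin => absurd hin hs, ?_⟩
            rw [List.count_cons]
            simp [List.count_eq_zero.mpr hnr]
          · refine ⟨fun hin hmem' => ?_, ?_⟩
            · rcases List.mem_cons.mp hmem' with h' | h'
              · exact hyx h'
              · exact hmem ((PySem.Set.mem_add _ _ _).mpr (Or.inl hin)) h'
            · rw [List.count_cons]
              simpa [Ne.symm hyx] using hcnt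
        · intro h y hy0 hy44
          rcases h y hy0 hy44 with ⟨hmem, hcnt⟩
          by_cases hyx : y = x
          · subst hyx
            simp only [List.count_cons, BEq.rfl, if_true] at hcnt
            refine ⟨fun _ => List.count_eq_zero.mp (by omega), by omega⟩
          · refine ⟨fun hin => ?_, ?_⟩
            · have : y ∈ seen := by
                rcases (PySem.Set.mem_add _ _ _).mp hin with h' | h'
                · exact h'
                · exact absurd h' hyx
              exact fun h' => hmem this (List.mem_cons_of_mem _ h')
            · rw [List.count_cons] at hcnt
              simpa [Ne.symm hyx] using hcnt
    · rw [checkAltLoop, if_neg hr]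
      rw [ih]
      constructor
      · intro h y hy0 hy44
        rcases h y hy0 hy44 with ⟨hmem, hcnt⟩
        have hyx : y ≠ x := by rintro rfl; exact hr ⟨hy0, hy44⟩
        refine ⟨fun hin hmem' => ?_, ?_⟩
        · rcases List.mem_cons.mp hmem' with h' | h'
          · exact hyx h'
          · exact hmem hin h'
        · rw [List.count_cons]; simpa [Ne.symm hyx] using hcnt
      · intro h y hy0 hy44
        rcases h y hy0 hy44 with ⟨hmem, hcnt⟩
        have hyx : y ≠ x := by rintro rfl; exact hr ⟨hy0, hy44⟩
        refine ⟨fun hin h' => hmem hin (List.mem_cons_of_mem _ h'), ?_⟩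
        rw [List.count_cons] at hcnt
        simpa [Ne.symm hyx] using hcnt

theorem check_iff_alt (xs : List Int) : check xs = check_alt xs := by
  have hA := checkLoop_eq_true xs 0
  have hB := checkAltLoop_eq_true xs PySem.Set.empty
  have hiff : check xs = true ↔ check_alt xs = true := by
    rw [check, check_alt, hA, hB]
    constructor
    · intro h y hy0 hy44
      refine ⟨fun hin => absurd hin (List.not_mem_nil), ?_⟩
      have := h y.toNat (Nat.zero_le _) (by omega)
      rwa [Int.toNat_of_nonneg hy0] at this
    · intro h j _ hj45
      exact (h (j : Int) (by positivity) (by omega)).2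
  cases hca : check_alt xs
  · cases hc : check xs
    · rfl
    · exact absurd (hiff.mp hc) (by simp [hca])
  · exact hiff.mpr hca

-- ===== VERDICT (by name: the statement is the Claim_ definition above) =====
theorem check_spec : Claim_equal_check := by
  intro xs _
  unfold Spec_check
  exact check_iff_alt xs
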